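-- pv_equiv track=rewrite | github.com/ParkHyeongKyu/baekjoon | bruteforce/pg-모의고사.py | solution
-- ===== SOURCE A (Python) =====
-- def solution(answers):
--     answer = []
--     cnt = []
--     supo = []
--     supo_1 = [1, 2, 3, 4, 5]  # 5
--     supo_2 = [2, 1, 2, 3, 2, 4, 2, 5]  # 8
--     supo_3 = [3, 3, 1, 1, 2, 2, 4, 4, 5, 5]  # 10
--     supo.append(supo_1)
--     supo.append(supo_2)
--     supo.append(supo_3)
--
--     for i in range(3):
--         answer_cnt = 0
--         for j in range(len(answers)):
--             if answers[j] == supo[i][j % len(supo[i])]: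
--                 answer_cnt += 1
--         cnt.append(answer_cnt)
--
--     max = 0
--     for i in range(3):
--         if max < cnt[i]:
--             max = cnt[i]
--             answer = []
--             answer.append(i + 1)
--         elif max == cnt[i]:
--             answer.append(i + 1)
--
--     return answer
-- ===== SOURCE B (Python) =====
-- def solution(answers):
--     patterns = ([1, 2, 3, 4, 5],
--                 [2, 1, 2, 3, 2, 4, 2, 5],
--                 [3, 3, 1, 1, 2, 2, 4, 4, 5, 5])
--     # Bucket approach: positions congruent to r (mod len(p)) all face the same
--     # pattern value p[r], so the score is the number of occurrences of p[r] in
--     # the stride slice answers[r::len(p)], summed over the residues r.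
--     scores = [sum(answers[r::len(p)].count(v) for r, v in enumerate(p))
--               for p in patterns]
--     best = max(scores)
--     return [i for i in (1, 2, 3) if scores[i - 1] == best]
-- ===== Notes on version B (the rewrite author's own statement) =====
-- stated objective: faster
-- what changed: B scores each pattern by bucketing: it stride-slices answers into residue classes answers[r::len(p)] and counts occurrences of the single pattern value p[r] in each slice (slice+count run as C-level bulk operations, replacing A's per-element Python comparison loop with modular indexing), then picks winners with max plus an equality filter instead of A's max-tracking rebuild loop.
import Mathlib
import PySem

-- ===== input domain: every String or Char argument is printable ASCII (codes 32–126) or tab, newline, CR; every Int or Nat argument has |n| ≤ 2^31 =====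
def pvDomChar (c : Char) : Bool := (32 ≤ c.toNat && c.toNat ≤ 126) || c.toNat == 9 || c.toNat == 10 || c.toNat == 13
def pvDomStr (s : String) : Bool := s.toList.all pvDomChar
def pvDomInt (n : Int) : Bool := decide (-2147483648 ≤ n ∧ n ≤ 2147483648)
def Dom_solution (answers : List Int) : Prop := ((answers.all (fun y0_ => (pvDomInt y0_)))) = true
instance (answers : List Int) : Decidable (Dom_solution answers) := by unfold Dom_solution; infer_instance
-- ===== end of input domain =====

-- B buckets positions by residue class (stride slices answers[r::len(p)] + count of p[r]) instead of
-- A's per-element comparison loops with modular pattern indexing; winners via max + equality filter.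

-- ===== PORT A =====
-- A's inner loop 'for j in range(len(answers)): if answers[j] == supo[i][j % len(supo[i])]: answer_cnt += 1'
def pvCountA (answers pat : List Int) : Int :=
  (PySem.List.pyRange 0 (PySem.List.len answers) 1).foldl
    (fun acc j =>
      if PySem.List.pyGetD answers j 0 =
          PySem.List.pyGetD pat (PySem.Int.mod j (PySem.List.len pat)) 0 then acc + 1 else acc) 0

def solution (answers : List Int) : List Int :=
  let supo : List (List Int) :=
    [[1, 2, 3, 4, 5], [2, 1, 2, 3, 2, 4, 2, 5], [3, 3, 1, 1, 2, 2, 4, 4, 5, 5]]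
  let cnt : List Int :=
    (PySem.List.pyRange 0 3 1).foldl
      (fun c i => c ++ [pvCountA answers (PySem.List.pyGetD supo i [])]) []
  let r : Int × List Int :=
    (PySem.List.pyRange 0 3 1).foldl
      (fun (s : Int × List Int) i =>
        let ci := PySem.List.pyGetD cnt i 0
        if s.1 < ci then (ci, [i + 1])
        else if s.1 = ci then (s.1, s.2 ++ [i + 1])
        else s) (0, [])
  r.2

-- ===== PORT B =====
-- hand port of the stride slice xs[0::L] (exact for step L ≥ 1, start already dropped, as B uses it)
def pvStride (L : Nat) : List Int → List Int
  | [] => []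
  | x :: t => x :: pvStride L (t.drop (L - 1))
termination_by xs => xs.length
decreasing_by simp only [List.length_drop, List.length_cons]; omega

-- 'sum(answers[r::len(p)].count(v) for r, v in enumerate(p))'
def pvScoreB (answers pat : List Int) : Int :=
  ((PySem.List.enumerate pat 0).map
    (fun rv => ((pvStride pat.length (answers.drop rv.1.toNat)).count rv.2 : Int))).sum

def solution_alt (answers : List Int) : List Int :=
  let scores : List Int :=
    [pvScoreB answers [1, 2, 3, 4, 5],
     pvScoreB answers [2, 1, 2, 3, 2, 4, 2, 5],
     pvScoreB answers [3, 3, 1, 1, 2, 2, 4, 4, 5, 5]]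
  let best : Int := match scores with | [] => 0 | x :: t => t.foldl max x   -- max(scores), nonempty
  ([1, 2, 3] : List Int).filter (fun i => decide (PySem.List.pyGetD scores (i - 1) 0 = best))

-- ===== PRECONDITION & SPEC =====
def Spec_solution (answers : List Int) (out : List Int) : Prop := out = solution_alt answers
instance (answers : List Int) (out : List Int) : Decidable (Spec_solution answers out) := by unfold Spec_solution; infer_instance

-- ===== CLAIM (what is proved, stated in full; the proofs are below) =====
def Claim_equal_solution : Prop := ∀ (answers : List Int), Dom_solution answers → Spec_solution answers (solution answers)

-- ===== LEMMAS AND PROOFS =====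

-- the key bucket identity, generalized over the position offset o
theorem bucket_eq (pat : List Int) (hL : pat ≠ []) :
    ∀ (xs : List Int) (o : Nat) (acc : Int),
      (PySem.List.enumerate xs (o : Int)).foldl
        (fun acc ja =>
          if ja.2 = PySem.List.pyGetD pat (PySem.Int.mod ja.1 (PySem.List.len pat)) 0
          then acc + 1 else acc) acc
      = acc + ∑ r ∈ Finset.range pat.length,
          ((pvStride pat.length (xs.drop r)).count
            (PySem.List.pyGetD pat (((r + o) % pat.length : Nat) : Int) 0) : Int) := by
  intro xs
  induction xs with
  | nil =>
    intro o acc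
    simp [PySem.List.enumerate_nil, pvStride]
  | cons x t ih =>
    intro o acc
    rw [PySem.List.enumerate_cons, List.foldl_cons]
    have hcast : ((o : Int) + 1) = ((o + 1 : Nat) : Int) := by push_cast; ring
    rw [hcast, ih (o + 1)]
    obtain ⟨n, hn⟩ : ∃ n, pat.length = n + 1 := ⟨pat.length - 1, by
      have := List.length_pos_iff.mpr hL; omega⟩
    have hmod : PySem.Int.mod (o : Int) (PySem.List.len pat) = ((o % pat.length : Nat) : Int) := by
      simp [PySem.List.len, PySem.Int.mod_natCast]
    -- split the RHS sum: first slice (r = 0) vs the rest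
    rw [hn]
    rw [Finset.sum_range_succ' (fun r =>
      ((pvStride (n + 1) ((x :: t).drop r)).count
        (PySem.List.pyGetD pat (((r + o) % (n + 1) : Nat) : Int) 0) : Int)) n]
    rw [Finset.sum_range_succ (fun r =>
      ((pvStride (n + 1) (t.drop r)).count
        (PySem.List.pyGetD pat (((r + (o + 1)) % (n + 1) : Nat) : Int) 0) : Int)) n]
    have hsum : ∀ r ∈ Finset.range n,
        ((pvStride (n + 1) ((x :: t).drop (r + 1))).count
          (PySem.List.pyGetD pat (((r + 1 + o) % (n + 1) : Nat) : Int) 0) : Int)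
        = ((pvStride (n + 1) (t.drop r)).count
          (PySem.List.pyGetD pat (((r + (o + 1)) % (n + 1) : Nat) : Int) 0) : Int) := by
      intro r _
      have hidx : r + 1 + o = r + (o + 1) := by omega
      rw [List.drop_succ_cons, hidx]
    rw [Finset.sum_congr rfl hsum]
    have hlast : (n + (o + 1)) % (n + 1) = o % (n + 1) := by
      have h : n + (o + 1) = (n + 1) + o := by omega
      rw [h, Nat.add_mod_left]
    have h0 : (0 + o) % (n + 1) = o % (n + 1) := by rw [Nat.zero_add]
    rw [hlast, h0]
    have hstride : pvStride (n + 1) ((x :: t).drop 0) =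
        x :: pvStride (n + 1) (t.drop n) := by
      rw [List.drop_zero]
      simp [pvStride]
    rw [hstride, List.count_cons, hmod, hn]
    push_cast
    split_ifs with h1 h2 h2
    · simp at h2; ring
    · simp at h2; exact absurd h1 h2
    · simp at h2; exact absurd h2 h1
    · simp at h2; ring

theorem countA_eq_bucket (answers pat : List Int) (hL : pat ≠ []) :
    pvCountA answers pat
      = ∑ r ∈ Finset.range pat.length,
          ((pvStride pat.length (answers.drop r)).count
            (PySem.List.pyGetD pat (((r + 0) % pat.length : Nat) : Int) 0) : Int) := by
  have h := bucket_eq pat hL answers 0 0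
  rw [Nat.cast_zero, zero_add] at h
  rw [← h]
  unfold pvCountA
  rw [PySem.List.enumerate_eq_map_pyRange (d := 0), List.foldl_map]

theorem map_sum_enumerate (f : Int × Int → Int) :
    ∀ (pat : List Int) (s : Nat),
      ((PySem.List.enumerate pat (s : Int)).map f).sum
        = ∑ r ∈ Finset.range pat.length, f (((s + r : Nat) : Int), pat.getD r 0) := by
  intro pat
  induction pat with
  | nil => intro s; simp [PySem.List.enumerate_nil]
  | cons p ps ih =>
    intro s
    rw [PySem.List.enumerate_cons, List.map_cons, List.sum_cons]
    have hcast : ((s : Int) + 1) = ((s + 1 : Nat) : Int) := by push_cast; ring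
    rw [hcast, ih (s + 1), List.length_cons]
    rw [Finset.sum_range_succ' (fun r =>
      f (((s + r : Nat) : Int), (p :: ps).getD r 0)) ps.length]
    have hsum : ∀ r ∈ Finset.range ps.length,
        f (((s + 1 + r : Nat) : Int), ps.getD r 0)
        = f (((s + (r + 1) : Nat) : Int), (p :: ps).getD (r + 1) 0) := by
      intro r _
      have hidx : s + 1 + r = s + (r + 1) := by omega
      rw [hidx, List.getD_cons_succ]
    rw [Finset.sum_congr rfl hsum]
    simp [add_comm]

theorem scoreB_eq_literal (answers pat : List Int) (hL : pat ≠ []) :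
    pvScoreB answers pat = pvCountA answers pat := by
  rw [countA_eq_bucket answers pat hL]
  unfold pvScoreB
  have h := map_sum_enumerate
    (fun rv => ((pvStride pat.length (answers.drop rv.1.toNat)).count rv.2 : Int)) pat 0
  rw [Nat.cast_zero] at h
  rw [h]
  refine Finset.sum_congr rfl ?_
  intro r hr
  have hrL : r < pat.length := Finset.mem_range.mp hr
  have hget : PySem.List.pyGetD pat ((r : Nat) : Int) 0 = pat.getD r 0 := by
    simp [pysem, PySem.List.pyGetD, hrL, List.getD]
  simp only [Nat.zero_add, Nat.add_zero, Int.toNat_natCast, Nat.mod_eq_of_lt hrL, hget]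

theorem countA_nonneg (answers pat : List Int) : 0 ≤ pvCountA answers pat := by
  unfold pvCountA
  generalize PySem.List.pyRange 0 (PySem.List.len answers) 1 = l
  suffices h : ∀ (l : List Int) (init : Int), 0 ≤ init →
      0 ≤ l.foldl (fun acc j =>
        if PySem.List.pyGetD answers j 0 =
            PySem.List.pyGetD pat (PySem.Int.mod j (PySem.List.len pat)) 0 then acc + 1 else acc) init by
    exact h l 0 le_rfl
  intro l
  induction l with
  | nil => intro init h; simpa using h
  | cons x xs ih =>
    intro init h
    simp only [List.foldl_cons]
    split <;> exact ih _ (by omega)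

theorem select_eq (c1 c2 c3 : Int) (h1 : 0 ≤ c1) (h2 : 0 ≤ c2) (h3 : 0 ≤ c3) :
    ((PySem.List.pyRange 0 3 1).foldl
      (fun (s : Int × List Int) i =>
        let ci := PySem.List.pyGetD [c1, c2, c3] i 0
        if s.1 < ci then (ci, [i + 1])
        else if s.1 = ci then (s.1, s.2 ++ [i + 1])
        else s) (0, [])).2 =
    ([1, 2, 3] : List Int).filter
      (fun i => decide (PySem.List.pyGetD [c1, c2, c3] (i - 1) 0 = [c2, c3].foldl max c1)) := by
  have hr : PySem.List.pyRange 0 3 1 = [0, 1, 2] := by decide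
  rw [hr]
  simp only [List.foldl_cons, List.foldl_nil, List.filter_cons, List.filter_nil,
    decide_eq_true_eq]
  have g0 : PySem.List.pyGetD [c1, c2, c3] 0 0 = c1 := rfl
  have g1 : PySem.List.pyGetD [c1, c2, c3] 1 0 = c2 := rfl
  have g2 : PySem.List.pyGetD [c1, c2, c3] 2 0 = c3 := rfl
  have e0 : PySem.List.pyGetD [c1, c2, c3] (1 - 1) 0 = c1 := rfl
  have e1 : PySem.List.pyGetD [c1, c2, c3] (2 - 1) 0 = c2 := rfl
  have e2 : PySem.List.pyGetD [c1, c2, c3] (3 - 1) 0 = c3 := rfl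
  simp only [g0, g1, g2, e0, e1, e2]
  split_ifs <;> first | rfl | (exfalso; omega)

-- ===== VERDICT (by name: the statement is the Claim_ definition above) =====
theorem solution_spec : Claim_equal_solution := by
  intro answers _
  unfold Spec_solution solution solution_alt
  simp only
  rw [scoreB_eq_literal answers _ (by decide), scoreB_eq_literal answers _ (by decide),
      scoreB_eq_literal answers _ (by decide)]
  have hr : PySem.List.pyRange 0 3 1 = [0, 1, 2] := by decide
  rw [hr]
  simp only [List.foldl_cons, List.foldl_nil]
  exact select_eq _ _ _ (countA_nonneg _ _) (countA_nonneg _ _) (countA_nonneg _ _)
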